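-- pv_equiv track=rewrite | github.com/RedRem95/AoC | AoC/y2022/Day19/__init__.py | _sanitize_sort_realities
-- ===== SOURCE A (Python) =====
-- from typing import Callable, AnyStr, Dict, List, Tuple
--
-- _REALITIES_TYPE = List[Tuple[Dict[str, int], Dict[str, int], int]]
--
-- def _sanitize_sort_realities(
--         realities: _REALITIES_TYPE
-- ) -> _REALITIES_TYPE:
--     realities = sorted(realities, key=lambda x: x[-1])
--
--     resources = [x[0] for x in realities]
--     del_keys = []
--     for i in range(len(realities) - 1):
--         if realities[i][0] in resources[i + 1:]:
--             del_keys.append(i)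
--
--     for k in del_keys[::-1]:
--         del realities[k]
--
--     return realities
-- ===== SOURCE B (Python) =====
-- # Single backward pass over the sorted list with a "seen resource dicts" list,
-- # instead of A's per-index slicing + membership scans and a deletion pass.
-- def _sanitize_sort_realities(realities):
--     srt = sorted(realities, key=lambda x: x[-1])
--     seen = []
--     out = []
--     for r in reversed(srt):
--         if r[0] not in seen:
--             seen.append(r[0])
--             out.append(r)
--     out.reverse()
--     return out
-- ===== Notes on version B (the rewrite author's own statement) =====
-- stated objective: simpler
-- what changed: A scans a tail slice of the resource list for every index to collect deletion indices and then deletes them in a second reverse pass; B makes one backward pass over the sorted list with a 'seen' list of resource dicts, keeping each reality whose resource dict has not been seen yet, and reverses the result.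
import Mathlib
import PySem

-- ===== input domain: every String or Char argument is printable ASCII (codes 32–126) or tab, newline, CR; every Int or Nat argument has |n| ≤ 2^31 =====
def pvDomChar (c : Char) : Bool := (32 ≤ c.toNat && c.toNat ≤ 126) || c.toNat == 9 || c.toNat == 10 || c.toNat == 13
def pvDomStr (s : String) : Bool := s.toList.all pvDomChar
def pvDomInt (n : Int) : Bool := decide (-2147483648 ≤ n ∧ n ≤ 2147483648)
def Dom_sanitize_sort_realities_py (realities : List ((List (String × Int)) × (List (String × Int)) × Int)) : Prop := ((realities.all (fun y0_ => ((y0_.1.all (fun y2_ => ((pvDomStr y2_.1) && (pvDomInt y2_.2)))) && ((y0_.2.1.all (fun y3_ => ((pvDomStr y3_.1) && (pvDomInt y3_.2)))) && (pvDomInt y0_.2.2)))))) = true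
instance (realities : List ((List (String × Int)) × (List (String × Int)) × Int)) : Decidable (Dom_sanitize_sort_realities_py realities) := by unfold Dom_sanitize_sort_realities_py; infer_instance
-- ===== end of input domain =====

-- B replaces A's per-index "is this resource dict in the tail slice" scans plus a
-- separate index-deletion pass by one backward pass over the sorted list with a
-- `seen` list of resource dicts (objective: simpler; neither version mutates the input list).

-- Python dict `==` (used by `in` on a list of dicts): same size and every key maps to the same value.
def dictEqPy (a b : List (String × Int)) : Bool :=
  (PySem.Dict.size (PySem.Dict.ofList a) == PySem.Dict.size (PySem.Dict.ofList b)) &&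
  (PySem.Dict.ofList a).items.all (fun kv => (PySem.Dict.ofList b).get? kv.1 == some kv.2)

-- Python `d in list_of_dicts`
def memDict (x : List (String × Int)) (l : List (List (String × Int))) : Bool :=
  l.any (fun y => dictEqPy x y)

-- ===== PORT A =====
def sanitize_sort_realities_py (realities : List ((List (String × Int)) × (List (String × Int)) × Int)) : List ((List (String × Int)) × (List (String × Int)) × Int) :=
  -- realities = sorted(realities, key=lambda x: x[-1])
  let rs := PySem.List.sorted realities (fun x => x.2.2) false
  -- resources = [x[0] for x in realities]
  let resources := rs.map (fun x => x.1)
  -- for i in range(len(realities) - 1): if realities[i][0] in resources[i + 1:]: del_keys.append(i)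
  let del_keys := (PySem.List.pyRange 0 ((rs.length : Int) - 1) 1).foldl
    (fun acc i =>
      if memDict (PySem.List.pyGetD rs i ([], [], 0)).1
          (PySem.List.slice resources (some (i + 1)) none) then acc ++ [i] else acc) ([] : List Int)
  -- for k in del_keys[::-1]: del realities[k]   (the indices are always in range, so pop? never misses)
  ((PySem.List.slice? del_keys none none (-1)).getD []).foldl
    (fun l k => match PySem.List.pop? l k with
      | some (_, l') => l'
      | none => l) rs

-- ===== PORT B =====
def sanitize_sort_realities_py_alt (realities : List ((List (String × Int)) × (List (String × Int)) × Int)) : List ((List (String × Int)) × (List (String × Int)) × Int) :=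
  let srt := PySem.List.sorted realities (fun x => x.2.2) false
  -- for r in reversed(srt): if r[0] not in seen: seen.append(r[0]); out.append(r)
  let st := srt.reverse.foldl
    (fun (st : List ((List (String × Int)) × (List (String × Int)) × Int) × List (List (String × Int))) r =>
      if memDict r.1 st.2 then st else (st.1 ++ [r], st.2 ++ [r.1])) ([], [])
  -- out.reverse(); return out
  st.1.reverse

-- ===== PRECONDITION & SPEC =====
def Spec_sanitize_sort_realities_py (realities : List ((List (String × Int)) × (List (String × Int)) × Int)) (out : List ((List (String × Int)) × (List (String × Int)) × Int)) : Prop := out = sanitize_sort_realities_py_alt realities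
instance (realities : List ((List (String × Int)) × (List (String × Int)) × Int)) (out : List ((List (String × Int)) × (List (String × Int)) × Int)) : Decidable (Spec_sanitize_sort_realities_py realities out) := by unfold Spec_sanitize_sort_realities_py; infer_instance

-- ===== CLAIM (what is proved, stated in full; the proofs are below) =====
def Claim_equal_sanitize_sort_realities_py : Prop := ∀ (realities : List ((List (String × Int)) × (List (String × Int)) × Int)), Dom_sanitize_sort_realities_py realities → Spec_sanitize_sort_realities_py realities (sanitize_sort_realities_py realities)

-- ===== LEMMAS AND PROOFS =====

-- the common specification: keep a reality iff its resource dict does not reoccur later in the sorted list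
def keepLast : List ((List (String × Int)) × (List (String × Int)) × Int) → List ((List (String × Int)) × (List (String × Int)) × Int)
  | [] => []
  | x :: xs => if memDict x.1 (xs.map (fun y => y.1)) then keepLast xs else x :: keepLast xs

theorem memDict_nil (x : List (String × Int)) : memDict x [] = false := rfl

theorem memDict_cons (x z : List (String × Int)) (s : List (List (String × Int))) :
    memDict x (z :: s) = (dictEqPy x z || memDict x s) := by simp [memDict]

theorem memDict_append (x : List (String × Int)) (s t : List (List (String × Int))) :
    memDict x (s ++ t) = (memDict x s || memDict x t) := by simp [memDict]

theorem memDict_reverse (x : List (String × Int)) (s : List (List (String × Int))) :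
    memDict x s.reverse = memDict x s := by simp [memDict]

theorem dictEqPy_trans {a b c : List (String × Int)} (hab : dictEqPy a b = true)
    (hbc : dictEqPy b c = true) : dictEqPy a c = true := by
  simp only [dictEqPy, Bool.and_eq_true, beq_iff_eq, List.all_eq_true] at *
  refine ⟨by omega, fun kv hkv => ?_⟩
  have h1 := hab.2 kv hkv
  have h2 := PySem.Dict.mem_items_of_get?_eq_some _ h1
  exact hbc.2 _ h2

theorem memDict_of_dictEqPy {x y : List (String × Int)} {s : List (List (String × Int))}
    (hxy : dictEqPy x y = true) (hy : memDict y s = true) : memDict x s = true := by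
  simp only [memDict, List.any_eq_true] at *
  obtain ⟨z, hz, hze⟩ := hy
  exact ⟨z, hz, dictEqPy_trans hxy hze⟩

-- ---------- B side ----------

def firstKeep : List ((List (String × Int)) × (List (String × Int)) × Int) → List (List (String × Int)) → List ((List (String × Int)) × (List (String × Int)) × Int)
  | [], _ => []
  | y :: ys, seen => if memDict y.1 seen then firstKeep ys seen else y :: firstKeep ys (seen ++ [y.1])

def seenAfter : List ((List (String × Int)) × (List (String × Int)) × Int) → List (List (String × Int)) → List (List (String × Int))
  | [], seen => seen
  | y :: ys, seen => if memDict y.1 seen then seenAfter ys seen else seenAfter ys (seen ++ [y.1])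

theorem foldl_eq_firstKeep (ys : List ((List (String × Int)) × (List (String × Int)) × Int))
    (out : List ((List (String × Int)) × (List (String × Int)) × Int)) (seen : List (List (String × Int))) :
    ys.foldl (fun st r => if memDict r.1 st.2 then st else (st.1 ++ [r], st.2 ++ [r.1])) (out, seen)
      = (out ++ firstKeep ys seen, seenAfter ys seen) := by
  induction ys generalizing out seen with
  | nil => simp [firstKeep, seenAfter]
  | cons y ys ih =>
    by_cases h : memDict y.1 seen = true
    · simp [firstKeep, seenAfter, h, ih]
    · simp only [Bool.not_eq_true] at h
      simp [firstKeep, seenAfter, h, ih]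

theorem memDict_seenAfter (x : List (String × Int)) (ys : List ((List (String × Int)) × (List (String × Int)) × Int))
    (seen : List (List (String × Int))) :
    memDict x (seenAfter ys seen) = (memDict x seen || memDict x (ys.map (fun y => y.1))) := by
  induction ys generalizing seen with
  | nil => simp [seenAfter, memDict_nil]
  | cons y ys ih =>
    by_cases h : memDict y.1 seen = true
    · rw [seenAfter, if_pos h, ih, List.map_cons, memDict_cons]
      cases hxy : dictEqPy x y.1
      · simp
      · rw [memDict_of_dictEqPy hxy h]
        simp
    · simp only [Bool.not_eq_true] at h
      rw [seenAfter, if_neg (by simp [h]), ih, List.map_cons, memDict_cons, memDict_append,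
        memDict_cons, memDict_nil, Bool.or_false, Bool.or_assoc]

theorem firstKeep_append (ys : List ((List (String × Int)) × (List (String × Int)) × Int))
    (x : (List (String × Int)) × (List (String × Int)) × Int) (seen : List (List (String × Int))) :
    firstKeep (ys ++ [x]) seen
      = firstKeep ys seen ++ (if memDict x.1 (seenAfter ys seen) then [] else [x]) := by
  induction ys generalizing seen with
  | nil => by_cases h : memDict x.1 seen = true <;> simp_all [firstKeep, seenAfter]
  | cons y ys ih =>
    by_cases h : memDict y.1 seen = true
    · simp [firstKeep, seenAfter, h, ih]
    · simp only [Bool.not_eq_true] at h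
      simp [firstKeep, seenAfter, h, ih]

theorem firstKeep_reverse (l : List ((List (String × Int)) × (List (String × Int)) × Int)) :
    (firstKeep l.reverse []).reverse = keepLast l := by
  induction l with
  | nil => simp [firstKeep, keepLast]
  | cons x xs ih =>
    have hseen : memDict x.1 (seenAfter xs.reverse []) = memDict x.1 (xs.map (fun y => y.1)) := by
      rw [memDict_seenAfter, memDict_nil, List.map_reverse, memDict_reverse, Bool.false_or]
    simp only [List.reverse_cons, firstKeep_append, hseen, keepLast]
    by_cases h : memDict x.1 (xs.map (fun y => y.1)) = true
    · simp [h, ih]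
    · simp only [Bool.not_eq_true] at h
      simp [h, ih]

theorem alt_eq_keepLast (realities : List ((List (String × Int)) × (List (String × Int)) × Int)) :
    sanitize_sort_realities_py_alt realities
      = keepLast (PySem.List.sorted realities (fun x => x.2.2) false) := by
  show (((PySem.List.sorted realities (fun x => x.2.2) false).reverse.foldl
      (fun (st : List ((List (String × Int)) × (List (String × Int)) × Int) × List (List (String × Int))) r =>
        if memDict r.1 st.2 then st else (st.1 ++ [r], st.2 ++ [r.1])) ([], [])).1).reverse
    = keepLast (PySem.List.sorted realities (fun x => x.2.2) false)
  rw [foldl_eq_firstKeep]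
  simpa using firstKeep_reverse (PySem.List.sorted realities (fun x => x.2.2) false)

-- ---------- A side ----------

-- the per-index condition of A's first loop, on natural indices
def qA (l : List ((List (String × Int)) × (List (String × Int)) × Int)) (j : Nat) : Bool :=
  memDict ((l.getD j ([], [], 0)).1) ((l.map (fun y => y.1)).drop (j + 1))

theorem pop_match_eq_eraseIdx (l : List ((List (String × Int)) × (List (String × Int)) × Int)) (j : Nat) :
    (match PySem.List.pop? l ((j : Nat) : Int) with
      | some (_, l') => l'
      | none => l) = l.eraseIdx j := by
  by_cases h : j < l.length
  · rw [PySem.List.pop?_natCast l j h]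
  · have h1 : PySem.List.pop? l ((j : Nat) : Int) = none := by
      simp only [PySem.List.pop?, PySem.List.pyIdx?]
      have h2 : ¬ (((j : Nat) : Int) < l.length) := by omega
      simp [h2]
    rw [h1, List.eraseIdx_of_length_le (by omega)]

theorem foldl_pop_eq_natDel (ks : List Nat) (l : List ((List (String × Int)) × (List (String × Int)) × Int)) :
    (ks.map (fun (j : Nat) => (j : Int))).foldl
        (fun l k => match PySem.List.pop? l k with
          | some (_, l') => l'
          | none => l) l
      = ks.foldl (fun l k => l.eraseIdx k) l := by
  induction ks generalizing l with
  | nil => rfl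
  | cons k ks ih => simp only [List.map_cons, List.foldl_cons, pop_match_eq_eraseIdx, ih]

theorem natDel_map_succ (ks : List Nat) (x : (List (String × Int)) × (List (String × Int)) × Int)
    (l : List ((List (String × Int)) × (List (String × Int)) × Int)) :
    (ks.map Nat.succ).foldl (fun l k => l.eraseIdx k) (x :: l)
      = x :: ks.foldl (fun l k => l.eraseIdx k) l := by
  induction ks generalizing l with
  | nil => rfl
  | cons k ks ih => simp [List.eraseIdx_cons_succ, ih]

theorem qA_succ (x : (List (String × Int)) × (List (String × Int)) × Int)
    (xs : List ((List (String × Int)) × (List (String × Int)) × Int)) (j : Nat) :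
    qA (x :: xs) (j + 1) = qA xs j := by
  simp [qA]

theorem natDel_filter_eq_keepLast (l : List ((List (String × Int)) × (List (String × Int)) × Int)) :
    (((List.range l.length).filter (qA l)).reverse).foldl (fun l k => l.eraseIdx k) l = keepLast l := by
  induction l with
  | nil => simp [keepLast]
  | cons x xs ih =>
    have hfilter : (List.range (x :: xs).length).filter (qA (x :: xs))
        = (if qA (x :: xs) 0 then [0] else []) ++ (List.filter (qA xs) (List.range xs.length)).map Nat.succ := by
      rw [List.length_cons, List.range_succ_eq_map, List.filter_cons, List.filter_map]
      rw [List.filter_congr (fun j _ => by simp [Function.comp, qA_succ] :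
        ∀ j ∈ List.range xs.length, ((qA (x :: xs)) ∘ Nat.succ) j = qA xs j)]
      by_cases h0 : qA (x :: xs) 0 = true
      · simp [h0]
      · simp only [Bool.not_eq_true] at h0; simp [h0]
    rw [hfilter, List.reverse_append, List.foldl_append, ← List.map_reverse, natDel_map_succ, ih]
    have h0 : qA (x :: xs) 0 = memDict x.1 (xs.map (fun y => y.1)) := by simp [qA]
    by_cases h : memDict x.1 (xs.map (fun y => y.1)) = true
    · rw [h0.trans h]; simp [keepLast, h]
    · simp only [Bool.not_eq_true] at h
      rw [h0.trans h]; simp [keepLast, h]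

theorem qA_last (l : List ((List (String × Int)) × (List (String × Int)) × Int)) :
    qA l (l.length - 1) = false := by
  cases l with
  | nil => simp [qA, memDict_nil]
  | cons x xs =>
    simp only [qA]
    rw [List.drop_eq_nil_of_le (by simp), memDict_nil]

theorem a_pipeline (rs : List ((List (String × Int)) × (List (String × Int)) × Int)) :
    ((PySem.List.slice?
        ((PySem.List.pyRange 0 ((rs.length : Int) - 1) 1).foldl
          (fun acc i =>
            if memDict (PySem.List.pyGetD rs i ([], [], 0)).1
                (PySem.List.slice (rs.map (fun x => x.1)) (some (i + 1)) none) then acc ++ [i] else acc)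
          ([] : List Int)) none none (-1)).getD []).foldl
      (fun l k => match PySem.List.pop? l k with
        | some (_, l') => l'
        | none => l) rs = keepLast rs := by
  have hrange : PySem.List.pyRange 0 ((rs.length : Int) - 1) 1
      = (List.range (rs.length - 1)).map (fun (j : Nat) => (j : Int)) := by
    rw [PySem.List.pyRange_one]
    have h1 : (((rs.length : Int) - 1) - 0).toNat = rs.length - 1 := by omega
    rw [h1]
    exact List.map_congr_left (fun j _ => by omega)
  have hdel : (PySem.List.pyRange 0 ((rs.length : Int) - 1) 1).foldl
      (fun acc i =>
        if memDict (PySem.List.pyGetD rs i ([], [], 0)).1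
            (PySem.List.slice (rs.map (fun x => x.1)) (some (i + 1)) none) then acc ++ [i] else acc)
      ([] : List Int)
      = ((List.range (rs.length - 1)).filter (qA rs)).map (fun (j : Nat) => (j : Int)) := by
    rw [hrange, PySem.List.foldl_append_if
      (p := fun i => memDict (PySem.List.pyGetD rs i ([], [], 0)).1
            (PySem.List.slice (rs.map (fun x => x.1)) (some (i + 1)) none))
      (f := fun i => i), List.filter_map, List.nil_append, List.map_map,
      List.filter_congr (fun j _ => ?_)]
    · exact List.map_congr_left (fun _ _ => rfl)
    · show memDict (PySem.List.pyGetD rs ((j : Nat) : Int) ([], [], 0)).1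
          (PySem.List.slice (rs.map (fun x => x.1)) (some (((j : Nat) : Int) + 1)) none) = qA rs j
      rw [PySem.List.pyGetD_natCast, PySem.List.slice_from _ (by omega : (0:Int) ≤ ((j : Nat) : Int) + 1)]
      have h2 : (((j : Nat) : Int) + 1).toNat = j + 1 := by omega
      rw [h2]
      rfl
  rw [hdel, PySem.List.slice?_none_none_neg_one, Option.getD_some, ← List.map_reverse,
    foldl_pop_eq_natDel]
  have hfull : (List.range (rs.length - 1)).filter (qA rs)
      = (List.range rs.length).filter (qA rs) := by
    cases hlen : rs.length with
    | zero => simp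
    | succ m =>
      rw [List.range_succ, List.filter_append]
      have hm : qA rs m = false := by
        have := qA_last rs
        rwa [hlen, Nat.add_sub_cancel] at this
      simp [hm]
  rw [hfull, natDel_filter_eq_keepLast]

theorem a_eq_keepLast (realities : List ((List (String × Int)) × (List (String × Int)) × Int)) :
    sanitize_sort_realities_py realities
      = keepLast (PySem.List.sorted realities (fun x => x.2.2) false) := by
  exact a_pipeline (PySem.List.sorted realities (fun x => x.2.2) false)

-- ===== VERDICT (by name: the statement is the Claim_ definition above) =====
theorem sanitize_sort_realities_py_spec : Claim_equal_sanitize_sort_realities_py := by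
  intro realities _hdom
  unfold Spec_sanitize_sort_realities_py
  rw [a_eq_keepLast, alt_eq_keepLast]
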